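-- pv_equiv track=rewrite | github.com/JorgeV92/Learn-it- | CodeForces/Python-Forces/B-Closest-to-the-Left.py | binary_search_bisect
-- ===== SOURCE A (Python) =====
-- from typing import List
-- import bisect
--
-- def binary_search_bisect(A: List[int], Q: List[int]) -> List[int]:
--     result = []
--     for q in Q:
--         # Find the insertion point for q in A to maintain sorted order.
--         index = bisect.bisect_right(A, q)
--         # index is the position where q would go to keep A sorted,
--         # which means all elements to the left of this index are <= q.
--         # So, the maximum index of an element not greater than q is index - 1.
--         if index > 0:
--             result.append(index)
--         else:
--             result.append(0)
--     return result
-- ===== SOURCE B (Python) =====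
-- from typing import List
--
-- def _br(A, q):
--     # recursive bisect_right on slices
--     if not A:
--         return 0
--     mid = len(A) // 2
--     if q < A[mid]:
--         return _br(A[:mid], q)
--     else:
--         return mid + 1 + _br(A[mid+1:], q)
--
-- def binary_search_bisect(A: List[int], Q: List[int]) -> List[int]:
--     return [_br(A, q) for q in Q]
-- ===== Notes on version B (the rewrite author's own statement) =====
-- stated objective: alternative
-- what changed: Replaces the per-query iterative lo/hi bisect_right loop (plus A's redundant index>0 guard) with a recursive divide-and-conquer bisect on list slices, mapped over the queries.
import Mathlib
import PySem

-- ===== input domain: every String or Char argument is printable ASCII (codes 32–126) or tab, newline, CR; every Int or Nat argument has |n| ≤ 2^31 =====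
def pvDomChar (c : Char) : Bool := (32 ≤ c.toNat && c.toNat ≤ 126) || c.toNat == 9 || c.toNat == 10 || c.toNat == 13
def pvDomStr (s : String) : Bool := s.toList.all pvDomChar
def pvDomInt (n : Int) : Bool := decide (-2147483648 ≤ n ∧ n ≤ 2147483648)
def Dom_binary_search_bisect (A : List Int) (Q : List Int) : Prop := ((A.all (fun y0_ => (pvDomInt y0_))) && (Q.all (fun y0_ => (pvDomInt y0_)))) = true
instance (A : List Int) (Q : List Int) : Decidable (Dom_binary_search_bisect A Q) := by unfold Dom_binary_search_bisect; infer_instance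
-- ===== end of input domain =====

-- B replaces the iterative lo/hi bisect_right loop (and A's redundant index>0 guard)
-- with a recursive divide-and-conquer bisect on list slices; objective: alternative decomposition.


-- ===== PORT A =====
-- bisect.bisect_right: while lo < hi: mid = (lo+hi)//2; if q < a[mid]: hi = mid else lo = mid+1
-- (a[mid] is always in range since lo < hi ≤ len a, so getD is exact here)
def bisectLoop (A : List Int) (q : Int) (lo hi : Nat) : Nat :=
  if lo < hi then
    if q < A.getD ((lo + hi) / 2) 0 then bisectLoop A q lo ((lo + hi) / 2)
    else bisectLoop A q ((lo + hi) / 2 + 1) hi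
  else lo
termination_by hi - lo
decreasing_by all_goals omega

def binary_search_bisect (A : List Int) (Q : List Int) : List Int :=
  Q.foldl (fun result q =>
    let index := bisectLoop A q 0 A.length
    if index > 0 then result ++ [(index : Int)] else result ++ [(0 : Int)]) []

-- ===== PORT B =====
-- recursive bisect_right on slices (A[:mid], A[mid+1:])
def brRec (A : List Int) (q : Int) : Nat :=
  if A = [] then 0
  else
    if q < A.getD (A.length / 2) 0 then brRec (A.take (A.length / 2)) q
    else A.length / 2 + 1 + brRec (A.drop (A.length / 2 + 1)) q
termination_by A.length
decreasing_by
  · rename_i h _; simp [List.length_take]; cases A with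
    | nil => simp at h
    | cons a t => simp; omega
  · rename_i h _; simp [List.length_drop]; cases A with
    | nil => simp at h
    | cons a t => simp

def binary_search_bisect_alt (A : List Int) (Q : List Int) : List Int :=
  Q.map (fun q => ((brRec A q : Nat) : Int))

-- ===== PRECONDITION & SPEC =====
def Spec_binary_search_bisect (A : List Int) (Q : List Int) (out : List Int) : Prop := out = binary_search_bisect_alt A Q
instance (A : List Int) (Q : List Int) (out : List Int) : Decidable (Spec_binary_search_bisect A Q out) := by unfold Spec_binary_search_bisect; infer_instance

-- ===== CLAIM (what is proved, stated in full; the proofs are below) =====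
def Claim_equal_binary_search_bisect : Prop := ∀ (A : List Int) (Q : List Int), Dom_binary_search_bisect A Q → Spec_binary_search_bisect A Q (binary_search_bisect A Q)

-- ===== LEMMAS AND PROOFS =====

-- The iterative search on [lo,hi) equals lo plus the recursive search on the slice A[lo:hi].
theorem bisectLoop_eq_brRec (A : List Int) (q : Int) :
    ∀ (d lo hi : Nat), hi - lo ≤ d → lo ≤ hi → hi ≤ A.length →
      bisectLoop A q lo hi = lo + brRec ((A.drop lo).take (hi - lo)) q := by
  intro d
  induction d with
  | zero =>
    intro lo hi hd hlh _
    have : hi = lo := by omega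
    subst this
    rw [bisectLoop, brRec]
    simp
  | succ n ih =>
    intro lo hi hd hlh hha
    by_cases h : lo < hi
    · rw [bisectLoop, if_pos h]
      set s := (A.drop lo).take (hi - lo) with hs
      have hslen : s.length = hi - lo := by
        simp [hs, List.length_take, List.length_drop]; omega
      have hm : (lo + hi) / 2 = lo + (hi - lo) / 2 := by omega
      have hmlt : (hi - lo) / 2 < hi - lo := by omega
      have hsne : s ≠ [] := by
        intro he; rw [he] at hslen; simp at hslen; omega
      have hget : s.getD ((hi - lo) / 2) 0 = A.getD ((lo + hi) / 2) 0 := by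
        have h1 : s[(hi - lo) / 2]? = A[(lo + hi) / 2]? := by
          rw [hs, List.getElem?_take_of_lt hmlt, List.getElem?_drop, hm]
        simp [List.getD, h1]
      rw [brRec, if_neg hsne, hslen, hget]
      by_cases hq : q < A.getD ((lo + hi) / 2) 0
      · rw [if_pos hq, if_pos hq]
        rw [ih lo ((lo + hi) / 2) (by omega) (by omega) (by omega)]
        have ht : s.take ((hi - lo) / 2) = (A.drop lo).take ((lo + hi) / 2 - lo) := by
          rw [hs, List.take_take]
          congr 1
          omega
        rw [ht]
      · rw [if_neg hq, if_neg hq]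
        rw [ih ((lo + hi) / 2 + 1) hi (by omega) (by omega) (by omega)]
        have h1 : lo + ((hi - lo) / 2 + 1) = (lo + hi) / 2 + 1 := by omega
        have h2 : hi - lo - ((hi - lo) / 2 + 1) = hi - ((lo + hi) / 2 + 1) := by omega
        have hdt : s.drop ((hi - lo) / 2 + 1)
            = (A.drop ((lo + hi) / 2 + 1)).take (hi - ((lo + hi) / 2 + 1)) := by
          rw [hs, List.drop_take, List.drop_drop, h1, h2]
        rw [hdt]
        omega
    · have : hi = lo := by omega
      subst this
      rw [bisectLoop, brRec]
      simp

theorem bisect_eq_br (A : List Int) (q : Int) :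
    bisectLoop A q 0 A.length = brRec A q := by
  have := bisectLoop_eq_brRec A q A.length 0 A.length (by omega) (by omega) (le_refl _)
  simpa using this

-- the foldl with the (redundant) index>0 guard builds exactly the mapped list
theorem foldl_build (A : List Int) (Q : List Int) (acc : List Int) :
    Q.foldl (fun result q =>
      let index := bisectLoop A q 0 A.length
      if index > 0 then result ++ [(index : Int)] else result ++ [(0 : Int)]) acc
    = acc ++ Q.map (fun q => ((brRec A q : Nat) : Int)) := by
  induction Q generalizing acc with
  | nil => simp
  | cons q t ih =>
    simp only [List.foldl_cons, List.map_cons, ih]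
    rw [bisect_eq_br]
    by_cases h : brRec A q > 0
    · simp [h]
    · have h0 : brRec A q = 0 := by omega
      simp [h0]

-- ===== VERDICT (by name: the statement is the Claim_ definition above) =====
theorem binary_search_bisect_spec : Claim_equal_binary_search_bisect := by
  intro A Q _
  unfold Spec_binary_search_bisect binary_search_bisect binary_search_bisect_alt
  simpa using foldl_build A Q []
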